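-- pv_equiv track=rewrite | github.com/marbl/ModDotPlot | src/moddotplot/estimate_identity.py | verify_modimizers
-- ===== SOURCE A (Python) =====
-- def verify_modimizers(sparsity, l):
--     # Get the next highest power of 2, if not provided
--     updated_sparsity = next_power_of_two(sparsity)
--
--     sparsity_layers = [updated_sparsity]
--     while l > 0:
--         if sparsity_layers[-1] == 1:
--             return sparsity_layers
--         elif sparsity_layers[-1] % 2 == 1:
--             sparsity_layers[-1] = int(sparsity_layers[-1] + 1)
--         sparsity_layers.append(int(sparsity_layers[-1] / 2))
--         l -= 1
--
--     return sparsity_layers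
--
-- def next_power_of_two(n):
--     if n <= 0:
--         return 1
--     n -= 1
--     n |= n >> 1
--     n |= n >> 2
--     n |= n >> 4
--     n |= n >> 8
--     n |= n >> 16
--     return n + 1
-- ===== SOURCE B (Python) =====
-- def verify_modimizers(sparsity, l):
--     # Same rounding-up helper as the original.
--     p = next_power_of_two(sparsity)
--     # p == 2**k; the layer list has min(max(l,0), k) halving steps after p.
--     k = p.bit_length() - 1
--     n = min(max(l, 0), k)
--     return [p >> i for i in range(n + 1)]
--
-- def next_power_of_two(n):
--     if n <= 0:
--         return 1
--     n -= 1
--     n |= n >> 1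
--     n |= n >> 2
--     n |= n >> 4
--     n |= n >> 8
--     n |= n >> 16
--     return n + 1
-- ===== Notes on version B (the rewrite author's own statement) =====
-- stated objective: simpler
-- what changed: Replaces the halve-until-1 while loop (with its dead odd-number branch and in-place list mutation) by computing the number of layers analytically from the power of two's bit length and emitting the list with one shift-based comprehension.
import Mathlib
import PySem

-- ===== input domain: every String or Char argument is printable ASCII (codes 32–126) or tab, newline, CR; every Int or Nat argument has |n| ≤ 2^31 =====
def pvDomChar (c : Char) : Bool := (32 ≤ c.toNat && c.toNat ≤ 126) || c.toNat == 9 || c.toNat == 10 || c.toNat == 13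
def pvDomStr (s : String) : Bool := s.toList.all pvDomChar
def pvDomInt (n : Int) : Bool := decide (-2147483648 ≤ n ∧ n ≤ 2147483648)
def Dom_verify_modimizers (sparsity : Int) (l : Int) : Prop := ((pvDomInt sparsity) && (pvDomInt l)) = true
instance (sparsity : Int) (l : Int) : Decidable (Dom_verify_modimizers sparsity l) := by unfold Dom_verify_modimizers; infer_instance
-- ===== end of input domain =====

-- B replaces A's halve-until-1 while loop by computing the number of layers from the
-- power of two's bit length and emitting the list with one shift comprehension (simpler).


-- ===== PORT A =====
-- helper next_power_of_two, shared verbatim by A's and B's Python sources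
def next_power_of_two (n : Int) : Int :=
  if n ≤ 0 then 1
  else
    let m1 := n - 1
    let m2 := PySem.Int.bor m1 (m1 >>> (1 : Nat))
    let m3 := PySem.Int.bor m2 (m2 >>> (2 : Nat))
    let m4 := PySem.Int.bor m3 (m3 >>> (4 : Nat))
    let m5 := PySem.Int.bor m4 (m4 >>> (8 : Nat))
    let m6 := PySem.Int.bor m5 (m5 >>> (16 : Nat))
    m6 + 1

-- A's while loop; fuel = remaining value of l; `layers[-1]` is getLast (the list is never
-- empty).  int(x/2) is PySem.Int.truncdiv x 2, exact here (all values ≤ 2^31 < 2^53).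
def vmLoop : Nat → List Int → List Int
  | 0, layers => layers
  | f + 1, layers =>
    if layers.getLast?.getD 0 = 1 then layers
    else
      let layers' :=
        if PySem.Int.mod (layers.getLast?.getD 0) 2 = 1 then
          layers.dropLast ++ [layers.getLast?.getD 0 + 1]   -- sparsity_layers[-1] = last + 1
        else layers
      vmLoop f (layers' ++ [PySem.Int.truncdiv (layers'.getLast?.getD 0) 2])

def verify_modimizers (sparsity : Int) (l : Int) : List Int :=
  vmLoop l.toNat [next_power_of_two sparsity]

-- ===== PORT B =====
def verify_modimizers_alt (sparsity : Int) (l : Int) : List Int :=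
  let p := next_power_of_two sparsity
  let k : Int := (PySem.Int.bitLength p : Int) - 1   -- p.bit_length() - 1
  let n := min (max l 0) k
  (PySem.List.pyRange 0 (n + 1) 1).map (fun i => p >>> i.toNat)   -- [p >> i for i in range(n+1)]

-- ===== PRECONDITION & SPEC =====
def Spec_verify_modimizers (sparsity : Int) (l : Int) (out : List Int) : Prop := out = verify_modimizers_alt sparsity l
instance (sparsity : Int) (l : Int) (out : List Int) : Decidable (Spec_verify_modimizers sparsity l out) := by unfold Spec_verify_modimizers; infer_instance

-- ===== CLAIM (what is proved, stated in full; the proofs are below) =====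
def Claim_equal_verify_modimizers : Prop := ∀ (sparsity : Int) (l : Int), Dom_verify_modimizers sparsity l → Spec_verify_modimizers sparsity l (verify_modimizers sparsity l)

-- ===== LEMMAS AND PROOFS =====

-- the bit-smearing cascade of next_power_of_two, over Nat
def orShift (j m : Nat) : Nat := m ||| (m >>> j)
def natSmear (m : Nat) : Nat := orShift 16 (orShift 8 (orShift 4 (orShift 2 (orShift 1 m))))

lemma intCast_shiftRight (m k : Nat) : ((m : Int) >>> k) = ((m >>> k : Nat) : Int) := by
  simp

lemma npot_eq_natSmear (n : Int) (h : 1 ≤ n) :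
    next_power_of_two n = ((natSmear (n - 1).toNat : Nat) : Int) + 1 := by
  rw [next_power_of_two, if_neg (by omega)]
  generalize hm : (n - 1).toNat = m
  rw [show n - 1 = (m : Int) by omega]
  simp only [intCast_shiftRight, PySem.Int.bor_natCast, natSmear, orShift]

lemma testBit_log2 (m : Nat) (h : 0 < m) : m.testBit (Nat.log2 m) = true := by
  have h1 := Nat.log2_self_le (by omega : m ≠ 0)
  have h2 := Nat.lt_log2_self (n := m)
  have hd : m / 2 ^ Nat.log2 m = 1 := Nat.div_eq_of_lt_le (by omega) (by omega)
  simp [Nat.testBit_eq_decide_div_mod_eq, hd]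

lemma natSmear_eq (m : Nat) (h0 : 0 < m) (h32 : m < 2 ^ 32) :
    natSmear m = 2 ^ (Nat.log2 m + 1) - 1 := by
  have hlog : Nat.log2 m < 32 := by
    have := Nat.log2_self_le (by omega : m ≠ 0)
    by_contra hc
    have : (2 : Nat) ^ 32 ≤ 2 ^ Nat.log2 m := Nat.pow_le_pow_right (by norm_num) (by omega)
    omega
  apply Nat.eq_of_testBit_eq
  intro i
  rw [Nat.testBit_two_pow_sub_one]
  by_cases hi : i < Nat.log2 m + 1
  · obtain ⟨d, hd31, hdi⟩ : ∃ d, d ≤ 31 ∧ d + i = Nat.log2 m := ⟨Nat.log2 m - i, by omega, by omega⟩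
    have hb : m.testBit (d + i) = true := by rw [hdi]; exact testBit_log2 m h0
    interval_cases d <;>
      simp_all [natSmear, orShift, Nat.testBit_shiftRight, ← Nat.add_assoc]
  · have hz : ∀ c, m.testBit (c + i) = false := by
      intro c
      apply Nat.testBit_eq_false_of_lt
      calc m < 2 ^ (Nat.log2 m + 1) := Nat.lt_log2_self
        _ ≤ 2 ^ (c + i) := Nat.pow_le_pow_right (by norm_num) (by omega)
    have hz0 : m.testBit i = false := by
      have := hz 0; simpa using this
    simp [natSmear, orShift, Nat.testBit_shiftRight, ← Nat.add_assoc, hz, hz0, hi]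

-- on the domain, next_power_of_two returns a power of two with exponent ≤ 31
lemma npot_pow (n : Int) (hdom : n ≤ 2 ^ 31) : ∃ k : Nat, k ≤ 31 ∧ next_power_of_two n = 2 ^ k := by
  by_cases h1 : n ≤ 0
  · exact ⟨0, by omega, by rw [next_power_of_two, if_pos h1]; norm_num⟩
  by_cases h2 : n = 1
  · refine ⟨0, by omega, ?_⟩
    subst h2
    rw [npot_eq_natSmear 1 le_rfl]
    norm_num [natSmear, orShift]
  · have hn2 : 2 ≤ n := by omega
    have hm0 : 0 < (n - 1).toNat := by omega
    have hm32 : (n - 1).toNat < 2 ^ 32 := by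
      have : ((2:Int) ^ 31) = (2147483648 : Int) := by norm_num
      omega
    refine ⟨Nat.log2 (n - 1).toNat + 1, ?_, ?_⟩
    · have hle : (n - 1).toNat < 2 ^ 31 := by
        have : ((2:Int) ^ 31) = (2147483648 : Int) := by norm_num
        omega
      by_contra hc
      have : (2 : Nat) ^ 31 ≤ 2 ^ Nat.log2 (n - 1).toNat := Nat.pow_le_pow_right (by norm_num) (by omega)
      have := Nat.log2_self_le (by omega : (n - 1).toNat ≠ 0)
      omega
    · rw [npot_eq_natSmear n (by omega), natSmear_eq _ hm0 hm32]
      have hpos : (1 : Nat) ≤ 2 ^ (Nat.log2 (n - 1).toNat + 1) := Nat.one_le_two_pow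
      push_cast [hpos]
      ring

lemma two_pow_shiftRight (k j : Nat) (h : j ≤ k) : ((2 : Int) ^ k) >>> j = 2 ^ (k - j) := by
  have h2 : ((2:Int) ^ k) = ((2 ^ k : Nat) : Int) := by push_cast; ring
  rw [h2, intCast_shiftRight, Nat.shiftRight_eq_div_pow, Nat.pow_div h (by norm_num)]
  push_cast; ring

lemma bitLength_two_pow (k : Nat) : PySem.Int.bitLength ((2 : Int) ^ k) = k + 1 := by
  have hne : ((2 : Int) ^ k) ≠ 0 := by positivity
  have h1 := PySem.Int.lt_two_pow_bitLength ((2 : Int) ^ k)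
  have h2 := PySem.Int.two_pow_bitLength_le ((2 : Int) ^ k) hne
  have habs : ((2 : Int) ^ k).natAbs = 2 ^ k := by
    simp [Int.natAbs_pow]
  rw [habs] at h1 h2
  have hk1 : k < PySem.Int.bitLength ((2 : Int) ^ k) :=
    (Nat.pow_lt_pow_iff_right (by norm_num)).mp h1
  have hk2 : PySem.Int.bitLength ((2 : Int) ^ k) - 1 ≤ k :=
    (Nat.pow_le_pow_iff_right (by norm_num)).mp h2
  omega

lemma mod_two_pow (k : Nat) (h : 1 ≤ k) : PySem.Int.mod ((2 : Int) ^ k) 2 = 0 := by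
  rw [PySem.Int.mod_eq_emod_of_pos (by norm_num)]
  exact Int.emod_eq_zero_of_dvd (dvd_pow_self 2 (by omega))

lemma one_lt_two_pow_int (k : Nat) (h : 1 ≤ k) : (1 : Int) < 2 ^ k := by
  calc (1 : Int) < 2 ^ 1 := by norm_num
    _ ≤ 2 ^ k := pow_le_pow_right₀ (by norm_num) h

lemma truncdiv_two_pow (k : Nat) (h1 : 1 ≤ k) (h32 : k ≤ 32) :
    PySem.Int.truncdiv ((2 : Int) ^ k) 2 = 2 ^ (k - 1) := by
  interval_cases k <;> decide

lemma layers_shift (k m : Nat) :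
    (List.range (m + 1 + 1)).map (fun i => (2 : Int) ^ (k - i)) =
      (2 : Int) ^ k :: (List.range (m + 1)).map (fun i => (2 : Int) ^ (k - 1 - i)) := by
  rw [List.range_succ_eq_map, List.map_cons, List.map_map]
  refine congrArg₂ _ (by norm_num) ?_
  apply List.map_congr_left
  intro j _
  simp only [Function.comp_apply]
  congr 1
  omega

-- A's loop on a power of two produces the descending layers
lemma vmLoop_pow (f : Nat) (k : Nat) (pre : List Int) (hk : k ≤ 32) :
    vmLoop f (pre ++ [(2 : Int) ^ k]) =
      pre ++ (List.range (min f k + 1)).map (fun i => (2 : Int) ^ (k - i)) := by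
  induction f generalizing k pre with
  | zero => simp [vmLoop]
  | succ f ih =>
    rw [vmLoop]
    by_cases hk0 : k = 0
    · subst hk0
      simp
    · have hk1 : 1 ≤ k := by omega
      rw [if_neg]
      · rw [if_neg]
        · simp only [List.getLast?_concat, Option.getD_some]
          rw [truncdiv_two_pow k hk1 hk,
              ih (k - 1) (pre ++ [(2 : Int) ^ k]) (by omega)]
          have hmin : min (f + 1) k = min f (k - 1) + 1 := by omega
          rw [hmin, layers_shift k (min f (k - 1))]
          simp
        · simp only [List.getLast?_concat, Option.getD_some]
          rw [mod_two_pow k hk1]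
          norm_num
      · simp only [List.getLast?_concat, Option.getD_some]
        exact ne_of_gt (one_lt_two_pow_int k hk1)


-- B's comprehension on a power of two produces the same layers
lemma alt_pow (sparsity l : Int) (k : Nat) (hk : k ≤ 32)
    (hp : next_power_of_two sparsity = 2 ^ k) :
    verify_modimizers_alt sparsity l =
      (List.range (min l.toNat k + 1)).map (fun i => (2 : Int) ^ (k - i)) := by
  have hkk : ((k + 1 : Nat) : Int) - 1 = (k : Int) := by push_cast; ring
  have hn : min (max l 0) (k : Int) + 1 = ((min l.toNat k + 1 : Nat) : Int) := by
    push_cast; omega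
  simp only [verify_modimizers_alt, hp, bitLength_two_pow, hkk, hn,
    PySem.List.pyRange_one, Int.sub_zero, List.map_map]
  apply List.map_congr_left
  intro j hj
  have hjk : j ≤ k := by
    rw [List.mem_range] at hj
    omega
  simp only [Function.comp_apply]
  rw [show ((0 : Int) + (j : Int)).toNat = j by omega, Int.shiftRight_natCast_right]
  exact two_pow_shiftRight k j hjk

-- ===== VERDICT (by name: the statement is the Claim_ definition above) =====
theorem verify_modimizers_spec : Claim_equal_verify_modimizers := by
  intro sparsity l hdom
  unfold Spec_verify_modimizers
  have hdom' : sparsity ≤ 2 ^ 31 := by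
    simp only [Dom_verify_modimizers, pvDomInt, Bool.and_eq_true, decide_eq_true_eq] at hdom
    have : ((2:Int) ^ 31) = (2147483648 : Int) := by norm_num
    omega
  obtain ⟨k, hk31, hp⟩ := npot_pow sparsity hdom'
  rw [alt_pow sparsity l k (by omega) hp]
  unfold verify_modimizers
  rw [hp, show [(2 : Int) ^ k] = [] ++ [(2 : Int) ^ k] from rfl,
      vmLoop_pow l.toNat k [] (by omega)]
  simp
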